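-- pv_equiv track=rewrite | github.com/AlexTyu/DistortionCorrectionTool | tools/calc.py | genPatterns
-- ===== SOURCE A (Python) =====
-- def genPatterns(power):
--     out = []
--     for i in range(1, power + 1):
--         for j in range(0, i + 1):
--             elem = ''
--             for k in range(0, i):
--                 if j + k - i < 0:
--                     elem += 'x'
--                 else:
--                     elem += 'y'
--                 if k < i - 1:
--                     elem += ' * '
--             out.append(elem)
--     return out
-- ===== SOURCE B (Python) =====
-- def genPatterns(power):
--     # Incremental rewriting: each pattern is derived from the previous one by a
--     # single edit, instead of being rebuilt term by term.  The row for degree i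
--     # starts from the previous row's all-'x' base extended by one more ' * x';
--     # then each subsequent pattern flips the last remaining 'x' (at character
--     # position 4*(i-j), since every term plus separator occupies 4 characters)
--     # into a 'y'.
--     out = []
--     base = ''
--     for i in range(1, power + 1):
--         base = 'x' if not base else base + ' * x'
--         s = base
--         out.append(s)
--         for j in range(1, i + 1):
--             p = 4 * (i - j)
--             s = s[:p] + 'y' + s[p + 1:]
--             out.append(s)
--     return out
-- ===== Notes on version B (the rewrite author's own statement) =====
-- stated objective: alternative
-- what changed: Instead of rebuilding each pattern string term by term (A's per-position k-loop with x/y test and separator handling), B derives each pattern from the previous one by a single edit: each row's base extends the previous base by ' * x', and each subsequent pattern flips the last 'x' (at computed character position 4*(i-j)) into a 'y'.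
import Mathlib
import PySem

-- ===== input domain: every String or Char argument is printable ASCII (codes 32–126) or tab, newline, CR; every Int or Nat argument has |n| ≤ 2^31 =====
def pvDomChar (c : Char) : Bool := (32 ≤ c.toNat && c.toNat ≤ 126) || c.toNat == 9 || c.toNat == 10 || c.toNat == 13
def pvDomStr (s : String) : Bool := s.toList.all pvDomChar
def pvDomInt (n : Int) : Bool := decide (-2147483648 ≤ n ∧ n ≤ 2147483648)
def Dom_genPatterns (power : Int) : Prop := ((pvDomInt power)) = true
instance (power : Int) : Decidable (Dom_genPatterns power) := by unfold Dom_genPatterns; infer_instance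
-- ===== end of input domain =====

-- B generates each pattern by a single-character edit of the previous pattern (flip the
-- last 'x' at position 4*(i-j) to 'y'; each row's base extends the previous base by
-- ' * x'), instead of rebuilding every string term by term (objective: alternative).

-- ===== PORT A =====
def genPatterns (power : Int) : List String :=
  (PySem.List.pyRange 1 (power + 1) 1).foldl (fun out i =>
    (PySem.List.pyRange 0 (i + 1) 1).foldl (fun out j =>
      out ++ [(PySem.List.pyRange 0 i 1).foldl (fun elem k =>
        let elem := elem ++ (if j + k - i < 0 then "x" else "y")
        if k < i - 1 then elem ++ " * " else elem) ""]) out) []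

-- ===== PORT B =====
def genPatterns_alt (power : Int) : List String :=
  ((PySem.List.pyRange 1 (power + 1) 1).foldl (fun (st : List String × String) i =>
      let base := if st.2 = "" then "x" else st.2 ++ " * x"
      let inner := (PySem.List.pyRange 1 (i + 1) 1).foldl (fun (st2 : List String × String) j =>
          let p := 4 * (i - j)
          let s := PySem.Str.slice st2.2 none (some p) ++ "y" ++
                   PySem.Str.slice st2.2 (some (p + 1)) none
          (st2.1 ++ [s], s))
        (st.1 ++ [base], base)
      (inner.1, base))
    ([], "")).1

-- ===== PRECONDITION & SPEC =====
def Spec_genPatterns (power : Int) (out : List String) : Prop := out = genPatterns_alt power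
instance (power : Int) (out : List String) : Decidable (Spec_genPatterns power out) := by unfold Spec_genPatterns; infer_instance

-- ===== CLAIM =====
def Claim_equal_genPatterns : Prop := ∀ (power : Int), Dom_genPatterns power → Spec_genPatterns power (genPatterns power)

-- ===== LEMMAS AND PROOFS =====

-- the (a x-tokens, b y-tokens) pattern string, the common description of both programs' elements
def Jstr (a b : Nat) : String :=
  PySem.Str.join " * " (List.replicate a "x" ++ List.replicate b "y")

def Jchars (a b : Nat) : List Char :=
  PySem.Chars.join [' ', '*', ' '] (List.replicate a ['x'] ++ List.replicate b ['y'])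

theorem toList_Jstr (a b : Nat) : (Jstr a b).toList = Jchars a b := by
  rw [Jstr, Jchars, PySem.Str.toList_join, List.map_append, List.map_replicate,
    List.map_replicate]
  rfl

-- the reference output: rows i = 1..n, row i = [Jstr i 0, Jstr (i-1) 1, …, Jstr 0 i]
def rows (n : Nat) : List String :=
  (List.range n).flatMap (fun k => (List.range (k + 2)).map (fun t => Jstr (k + 1 - t) t))

theorem rows_succ (M : Nat) :
    rows (M + 1) = rows M ++ (List.range (M + 2)).map (fun t => Jstr (M + 1 - t) t) := by
  rw [rows, rows, List.range_succ, List.flatMap_append, List.flatMap_cons, List.flatMap_nil,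
    List.append_nil]

-- prefix of A's inner loop, on char lists: p tokens, each followed by the separator
def fullC (a : Nat) : Nat → List Char
  | 0 => []
  | p + 1 => fullC a p ++ (if p < a then ['x'] else ['y']) ++ [' ', '*', ' ']

theorem len_fullC (a p : Nat) : (fullC a p).length = 4 * p := by
  induction p with
  | zero => rfl
  | succ q ih => rw [fullC]; simp only [List.length_append, ih]; split_ifs <;> simp <;> omega

theorem join_append_singleton (sep t : List Char) (ts : List (List Char)) (h : ts ≠ []) :
    PySem.Chars.join sep (ts ++ [t]) = PySem.Chars.join sep ts ++ sep ++ t := by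
  induction ts with
  | nil => exact absurd rfl h
  | cons p rest ih =>
    cases rest with
    | nil => simp [PySem.Chars.join_cons_cons, PySem.Chars.join_singleton]
    | cons q rest' =>
      simp only [List.cons_append] at ih ⊢
      rw [PySem.Chars.join_cons_cons, ih (by simp), PySem.Chars.join_cons_cons]
      simp [List.append_assoc]

-- fullC only looks at positions below p, so its bound can be raised past p
theorem fullC_le (a a' p : Nat) (h : p ≤ a) (h' : p ≤ a') : fullC a p = fullC a' p := by
  induction p with
  | zero => rfl
  | succ q ih =>
    rw [fullC, fullC, ih (by omega) (by omega),
      if_pos (by omega : q < a), if_pos (by omega : q < a')]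

-- join of a ≥ 1 copies of ['x']
theorem join_rep_x (a : Nat) (h : 1 ≤ a) :
    PySem.Chars.join [' ', '*', ' '] (List.replicate a ['x']) = fullC a (a - 1) ++ ['x'] := by
  induction a with
  | zero => omega
  | succ a' ih =>
    rcases Nat.eq_zero_or_pos a' with hz | hpos
    · subst hz; simp [PySem.Chars.join_singleton, fullC]
    · rw [List.replicate_succ' (n := a'), join_append_singleton _ _ _ (by
        simp only [ne_eq, List.replicate_eq_nil_iff]; omega), ih hpos]
      rw [show a' + 1 - 1 = a' by omega]
      obtain ⟨m, rfl⟩ : ∃ m, a' = m + 1 := ⟨a' - 1, by omega⟩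
      rw [show m + 1 - 1 = m by omega, fullC, if_pos (by omega : m < m + 1 + 1),
        fullC_le (m + 1) (m + 1 + 1) m (by omega) (by omega)]

-- the pattern's token list joins to: all-but-last tokens with separators, then the last token
theorem join_rep (a b : Nat) (h : 1 ≤ a + b) :
    Jchars a b = fullC a (a + b - 1) ++ (if a + b - 1 < a then ['x'] else ['y']) := by
  rw [Jchars]
  induction b with
  | zero =>
    simp only [List.replicate_zero, List.append_nil, Nat.add_zero]
    rw [join_rep_x a h, if_pos (by omega : a - 1 < a)]
  | succ b' ihb =>
    by_cases hz : a + b' = 0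
    · obtain ⟨ha, hb⟩ : a = 0 ∧ b' = 0 := by omega
      subst ha hb
      simp [PySem.Chars.join_singleton, fullC]
    · rw [List.replicate_succ' (n := b'), ← List.append_assoc,
        join_append_singleton _ _ _ (by
          simp only [ne_eq, List.append_eq_nil_iff, List.replicate_eq_nil_iff]
          omega),
        ihb (by omega)]
      rw [show a + (b' + 1) - 1 = (a + b' - 1) + 1 by omega, fullC]
      rw [if_neg (by omega : ¬ a + b' - 1 + 1 < a)]

theorem len_Jchars (a b : Nat) (h : 1 ≤ a + b) : (Jchars a b).length = 4 * (a + b) - 3 := by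
  rw [join_rep a b h]
  simp only [List.length_append, len_fullC]
  split_ifs <;> simp <;> omega

-- appending one more y-token to a nonempty pattern
theorem Jchars_succ_y (a b : Nat) (h : 1 ≤ a + b) :
    Jchars a (b + 1) = Jchars a b ++ [' ', '*', ' '] ++ ['y'] := by
  rw [Jchars, Jchars, List.replicate_succ' (n := b), ← List.append_assoc,
    join_append_singleton _ _ _ (by
      simp only [ne_eq, List.append_eq_nil_iff, List.replicate_eq_nil_iff]; omega)]

-- appending one more x-token to a nonempty all-x pattern
theorem Jchars_succ_x (a : Nat) (h : 1 ≤ a) :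
    Jchars (a + 1) 0 = Jchars a 0 ++ [' ', '*', ' '] ++ ['x'] := by
  rw [Jchars, Jchars]
  simp only [List.replicate_zero, List.append_nil]
  rw [List.replicate_succ' (n := a),
    join_append_singleton _ _ _ (by simp only [ne_eq, List.replicate_eq_nil_iff]; omega)]

-- B's single-character edit: flipping position 4a of the (a+1 x's, b y's) pattern
theorem flipJ (a b : Nat) :
    (Jchars (a + 1) b).take (4 * a) ++ ['y'] ++ (Jchars (a + 1) b).drop (4 * a + 1)
      = Jchars a (b + 1) := by
  induction b with
  | zero =>
    have hJ : Jchars (a + 1) 0 = fullC (a + 1) a ++ ['x'] := by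
      rw [join_rep (a + 1) 0 (by omega)]
      simp only [Nat.add_zero, Nat.add_sub_cancel]
      rw [if_pos (by omega : a < a + 1)]
    rw [hJ, List.take_append_of_le_length (by rw [len_fullC]),
      List.take_of_length_le (by rw [len_fullC]),
      List.drop_eq_nil_of_le (by simp [len_fullC]), List.append_nil]
    rcases Nat.eq_zero_or_pos a with hz | hpos
    · subst hz; simp [fullC, Jchars, PySem.Chars.join_singleton]
    · rw [join_rep a 1 (by omega)]
      simp only [Nat.add_sub_cancel]
      rw [if_neg (by omega : ¬ a < a), fullC_le (a + 1) a a (by omega) (by omega)]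
  | succ b' ih =>
    have hlen : (Jchars (a + 1) b').length = 4 * (a + 1 + b') - 3 :=
      len_Jchars (a + 1) b' (by omega)
    have h1 : (Jchars (a + 1) b' ++ [' ', '*', ' '] ++ ['y']).take (4 * a)
        = (Jchars (a + 1) b').take (4 * a) := by
      rw [List.append_assoc, List.take_append_of_le_length (by omega)]
    have h2 : (Jchars (a + 1) b' ++ [' ', '*', ' '] ++ ['y']).drop (4 * a + 1)
        = (Jchars (a + 1) b').drop (4 * a + 1) ++ ([' ', '*', ' '] ++ ['y']) := by
      rw [List.append_assoc, List.drop_append_of_le_length (by omega)]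
    rw [Jchars_succ_y (a + 1) b' (by omega), h1, h2,
      Jchars_succ_y a (b' + 1) (by omega), ← ih]
    simp [List.append_assoc]

-- Jstr versions of the two edits
theorem Jstr_one : Jstr 1 0 = "x" := by rfl

theorem Jstr_succ_x (a : Nat) (h : 1 ≤ a) : Jstr (a + 1) 0 = Jstr a 0 ++ " * x" := by
  apply String.toList_inj.mp
  rw [toList_Jstr, String.toList_append, toList_Jstr, Jchars_succ_x a h]
  simp [List.append_assoc]

theorem Jstr_ne_empty (a b : Nat) (h : 1 ≤ a + b) : Jstr a b ≠ "" := by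
  intro hc
  have := congrArg String.toList hc
  rw [toList_Jstr] at this
  have := congrArg List.length this
  rw [len_Jchars a b h] at this
  simp at this
  omega

theorem Jstr_flip (a b : Nat) :
    PySem.Str.slice (Jstr (a + 1) b) none (some (4 * (a : Int))) ++ "y" ++
      PySem.Str.slice (Jstr (a + 1) b) (some (4 * (a : Int) + 1)) none
    = Jstr a (b + 1) := by
  apply String.toList_inj.mp
  simp only [String.toList_append, PySem.Str.toList_slice,
    PySem.Chars.slice_eq_listSlice, toList_Jstr]
  rw [PySem.List.slice_to _ (by positivity), PySem.List.slice_from _ (by positivity)]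
  rw [show ((4 * (a : Int))).toNat = 4 * a by omega,
    show ((4 * (a : Int) + 1)).toNat = 4 * a + 1 by omega]
  exact flipJ a b

-- A's inner loop over range p (p < n): every position gets a separator
theorem fold_prefix (n a : Nat) (p : Nat) (hp : p < n) :
    ((List.range p).foldl (fun (e : String) (k : Nat) =>
        let e' := e ++ (if k < a then "x" else "y")
        if k + 1 < n then e' ++ " * " else e') "").toList = fullC a p := by
  induction p with
  | zero => rfl
  | succ p' ih =>
    rw [List.range_succ, List.foldl_append]
    simp only [List.foldl_cons, List.foldl_nil]
    rw [if_pos (by omega : p' + 1 < n)]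
    simp only [String.toList_append, ih (by omega), fullC]
    by_cases h : p' < a
    · rw [if_pos h, if_pos h]; rfl
    · rw [if_neg h, if_neg h]; rfl

-- A's full inner loop: separated prefix plus the unseparated last token
theorem fold_inner (n a : Nat) (hn : 1 ≤ n) :
    ((List.range n).foldl (fun (e : String) (k : Nat) =>
        let e' := e ++ (if k < a then "x" else "y")
        if k + 1 < n then e' ++ " * " else e') "").toList
      = fullC a (n - 1) ++ (if n - 1 < a then ['x'] else ['y']) := by
  obtain ⟨m, rfl⟩ : ∃ m, n = m + 1 := ⟨n - 1, by omega⟩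
  rw [List.range_succ, List.foldl_append]
  simp only [List.foldl_cons, List.foldl_nil]
  rw [if_neg (by omega : ¬ m + 1 < m + 1)]
  simp only [String.toList_append, fold_prefix (m + 1) a m (by omega), Nat.add_sub_cancel]
  by_cases h : m < a
  · rw [if_pos h, if_pos h]; rfl
  · rw [if_neg h, if_neg h]; rfl

-- A's per-(i,j) element is the (i-j, j) pattern
theorem inner_eq (i j : Int) (hi : 1 ≤ i) (hj0 : 0 ≤ j) (hji : j ≤ i) :
    (PySem.List.pyRange 0 i 1).foldl (fun elem k =>
        let elem := elem ++ (if j + k - i < 0 then "x" else "y")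
        if k < i - 1 then elem ++ " * " else elem) ""
      = Jstr (i - j).toNat j.toNat := by
  set n : Nat := i.toNat with hn
  set a : Nat := (i - j).toNat with ha
  set b : Nat := j.toNat with hb
  have hi' : i = (n : Int) := by omega
  have hab : n = a + b := by omega
  apply String.toList_inj.mp
  rw [hi', PySem.List.pyRange_zero_natCast, List.foldl_map]
  rw [PySem.List.foldl_congr_mem (List.range n) _
      (fun (e : String) (k : Nat) =>
        let e' := e ++ (if k < a then "x" else "y")
        if k + 1 < n then e' ++ " * " else e') ""
      (by
        intro e k hk
        simp only [List.mem_range] at hk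
        have h1 : (j + (k : Int) - (n : Int) < 0) ↔ ((k : Nat) < a) := by omega
        have h2 : ((k : Int) < (n : Int) - 1) ↔ (k + 1 < n) := by omega
        simp only [h1, h2])]
  rw [fold_inner n a (by omega), toList_Jstr, join_rep a b (by omega), hab]

-- A equals the reference output
theorem A_eq_rows (N : Nat) : genPatterns (N : Int) = rows N := by
  rw [genPatterns, PySem.List.pyRange_one 1 ((N : Int) + 1), show ((N : Int) + 1 - 1) = (N : Int) by ring,
    Int.toNat_natCast, List.foldl_map]
  induction N with
  | zero => rfl
  | succ M ih =>
    rw [List.range_succ, List.foldl_append, ih, List.foldl_cons, List.foldl_nil]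
    rw [PySem.List.foldl_congr_mem _ _
        (fun (out : List String) (j : Int) => out ++ [Jstr ((1 + (M : Int)) - j).toNat j.toNat])
        (rows M)
        (by
          intro out j hj
          rw [PySem.List.mem_pyRange_one] at hj
          rw [inner_eq (1 + (M : Int)) j (by omega) (by omega) (by omega)])]
    rw [PySem.List.foldl_append_singleton_eq_map,
      show (1 + (M : Int) + 1) = ((M + 2 : Nat) : Int) by push_cast; ring,
      PySem.List.pyRange_zero_natCast, List.map_map]
    rw [rows_succ]
    congr 1
    apply List.map_congr_left
    intro t ht
    rw [List.mem_range] at ht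
    simp only [Function.comp]
    congr 1 <;> omega

-- B's inner loop: m flips starting from the (n, 0) base
theorem B_inner (n : Nat) (m : Nat) (hm : m ≤ n) (out0 : List String) :
    (PySem.List.pyRange 1 ((m : Int) + 1) 1).foldl
      (fun (st2 : List String × String) j =>
        let p := 4 * ((n : Int) - j)
        let s := PySem.Str.slice st2.2 none (some p) ++ "y" ++
                 PySem.Str.slice st2.2 (some (p + 1)) none
        (st2.1 ++ [s], s))
      (out0, Jstr n 0)
    = (out0 ++ (List.range m).map (fun t => Jstr (n - (t + 1)) (t + 1)), Jstr (n - m) m) := by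
  induction m with
  | zero =>
    rw [show ((0 : Nat) : Int) + 1 = 1 by ring, PySem.List.pyRange_one_eq_nil (by omega)]
    simp
  | succ m' ih =>
    rw [show ((m' + 1 : Nat) : Int) + 1 = ((m' : Int) + 1) + 1 by push_cast; ring,
      PySem.List.pyRange_one_succ_right (by omega), List.foldl_append, ih (by omega),
      List.foldl_cons, List.foldl_nil]
    obtain ⟨c, hc⟩ : ∃ c, n - m' = c + 1 := ⟨n - m' - 1, by omega⟩
    have hp : 4 * ((n : Int) - ((m' : Int) + 1)) = 4 * ((c : Nat) : Int) := by
      have : n - (m' + 1) = c := by omega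
      omega
    simp only [hc, hp, Jstr_flip c m']
    rw [List.range_succ, List.map_append, List.map_cons, List.map_nil, ← List.append_assoc]
    have h1 : n - (m' + 1) = c := by omega
    rw [h1]

-- B's outer loop: all rows, with the current base as second component
theorem B_outer (N : Nat) :
    (PySem.List.pyRange 1 ((N : Int) + 1) 1).foldl
      (fun (st : List String × String) i =>
        let base := if st.2 = "" then "x" else st.2 ++ " * x"
        let inner := (PySem.List.pyRange 1 (i + 1) 1).foldl
          (fun (st2 : List String × String) j =>
            let p := 4 * (i - j)
            let s := PySem.Str.slice st2.2 none (some p) ++ "y" ++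
                     PySem.Str.slice st2.2 (some (p + 1)) none
            (st2.1 ++ [s], s))
          (st.1 ++ [base], base)
        (inner.1, base))
      ([], "")
    = (rows N, if N = 0 then "" else Jstr N 0) := by
  induction N with
  | zero =>
    rw [show ((0 : Nat) : Int) + 1 = 1 by ring, PySem.List.pyRange_one_eq_nil (by omega)]
    rfl
  | succ M ih =>
    rw [show ((M + 1 : Nat) : Int) + 1 = ((M : Int) + 1) + 1 by push_cast; ring,
      PySem.List.pyRange_one_succ_right (by omega), List.foldl_append, ih,
      List.foldl_cons, List.foldl_nil]
    have hbase : (if (if M = 0 then "" else Jstr M 0) = "" then "x"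
        else (if M = 0 then "" else Jstr M 0) ++ " * x") = Jstr (M + 1) 0 := by
      rcases Nat.eq_zero_or_pos M with hz | hpos
      · subst hz; rw [if_pos rfl, if_pos rfl, Jstr_one]
      · rw [if_neg (show ¬ M = 0 by omega), if_neg (Jstr_ne_empty M 0 (by omega)),
          Jstr_succ_x M (by omega)]
    simp only [hbase]
    rw [show ((M : Int) + 1) + 1 = ((M + 1 : Nat) : Int) + 1 by push_cast; ring]
    rw [PySem.List.foldl_congr_mem _ _
        (fun (st2 : List String × String) (j : Int) =>
          let p := 4 * (((M + 1 : Nat) : Int) - j)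
          let s := PySem.Str.slice st2.2 none (some p) ++ "y" ++
                   PySem.Str.slice st2.2 (some (p + 1)) none
          (st2.1 ++ [s], s)) _
        (by
          intro st2 j hj
          simp only [show ((M : Int) + 1) = ((M + 1 : Nat) : Int) by push_cast; ring])]
    rw [B_inner (M + 1) (M + 1) (by omega)]
    simp only [if_neg (by omega : ¬ M + 1 = 0)]
    refine Prod.ext ?_ rfl
    have hrow : (List.range (M + 2)).map (fun t => Jstr (M + 1 - t) t)
        = [Jstr (M + 1) 0] ++ (List.range (M + 1)).map (fun t => Jstr (M + 1 - (t + 1)) (t + 1)) := by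
      rw [show M + 2 = M + 1 + 1 from rfl, List.range_succ_eq_map, List.map_cons, List.map_map]
      simp only [Nat.sub_zero, List.singleton_append]
      exact congrArg _ (List.map_congr_left (fun t _ => by simp [Function.comp]))
    simp only [rows_succ, hrow, List.append_assoc]

-- B equals the reference output
theorem B_eq_rows (N : Nat) : genPatterns_alt (N : Int) = rows N := by
  rw [genPatterns_alt, B_outer N]

-- ===== VERDICT (by name: the statement is the Claim_ definition above) =====
theorem genPatterns_spec : Claim_equal_genPatterns := by
  intro power _
  unfold Spec_genPatterns
  by_cases hneg : power ≤ 0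
  · rw [genPatterns, genPatterns_alt,
      PySem.List.pyRange_one_eq_nil (by omega : power + 1 ≤ 1)]
    rfl
  · obtain ⟨N, rfl⟩ : ∃ N : Nat, power = (N : Int) := ⟨power.toNat, by omega⟩
    rw [A_eq_rows N, B_eq_rows N]
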